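-- pv_equiv track=rewrite | github.com/Ahnd6474/Programming2 | lecture 1/5 Light Up.py | board_is_happy
-- ===== SOURCE A (Python) =====
-- def count_adjacent_lamps(board, start_x, start_y):
--     """(x, y)의 상하좌우 인접 칸 중 램프('L') 개수 반환"""
--     lamps = 0
--     for dx, dy in [(-1, 0), (1, 0), (0, -1), (0, 1)]:
--         x, y = start_x + dx, start_y + dy
--         if is_on_board(board, x, y) and is_lamp(board[y][x]):
--             lamps += 1
--     return lamps
--
-- def is_black(cell):
--     """검은 칸(X) 또는 숫자 칸 여부"""
--     return cell == 'X' or is_numbered(cell)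
--
-- def is_lamp(cell):
--     return cell == 'L'
--
-- def is_numbered(cell):
--     return cell.isdigit()
--
-- def is_on_board(board, x, y):
--     size = len(board)
--     return 0 <= x < size and 0 <= y < size
--
-- def is_illuminated(board, start_x, start_y):
--     """같은 행/열에서 검은 칸에 막히기 전 램프가 있으면 비춰짐"""
--     for dx, dy in [(-1, 0), (1, 0), (0, -1), (0, 1)]:
--         x, y = start_x, start_y
--         while True:
--             x, y = x + dx, y + dy
--             if not is_on_board(board, x, y):
--                 break
--             cell = board[y][x]
--             if is_black(cell):
--                 break
--             if is_lamp(cell):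
--                 return True
--     return False
--
-- def board_is_happy(board):
--     """
--     숫자 칸 인접 램프 수가 숫자를 초과하지 않고,
--     서로를 비추는 램프 쌍이 없으면 happy
--     """
--     size = len(board)
--     for y in range(size):
--         for x in range(size):
--             cell = board[y][x]
--             if is_numbered(cell) and count_adjacent_lamps(board, x, y) > int(cell):
--                 return False
--             if is_lamp(cell) and is_illuminated(board, x, y):
--                 return False
--     return True
-- ===== SOURCE B (Python) =====
-- def board_is_happy(board):
--     """Happy iff no numbered cell exceeds its adjacent-lamp budget and no two
--     lamps illuminate each other.  Instead of ray-marching from every lamp in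
--     four directions, scan each row and each column once: two lamps inside one
--     segment between black cells mean mutual illumination."""
--     n = len(board)
--     grid = [row[:n] for row in board]
--     # numbered-cell constraint
--     for y in range(n):
--         for x in range(n):
--             c = grid[y][x]
--             if c.isdigit():
--                 adj = 0
--                 for nx, ny in ((x - 1, y), (x + 1, y), (x, y - 1), (x, y + 1)):
--                     if 0 <= nx < n and 0 <= ny < n and grid[ny][nx] == 'L':
--                         adj += 1
--                 if adj > int(c):
--                     return False
--     # mutual illumination: one pass per line, counting lamps per open segment
--     lines = list(grid)
--     lines.extend([grid[y][x] for y in range(n)] for x in range(n))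
--     for line in lines:
--         lamps = 0
--         for c in line:
--             if c == 'X' or c.isdigit():
--                 lamps = 0
--             elif c == 'L':
--                 lamps += 1
--                 if lamps >= 2:
--                     return False
--     return True
-- ===== Notes on version B (the rewrite author's own statement) =====
-- stated objective: alternative
-- what changed: Replaces per-lamp four-direction ray marching with a single segment scan per row and per column (a lamp counter reset at black cells; two lamps in one open segment mean mutual illumination).
-- outside the precondition, e.g. on board_is_happy([['L', 'L'], ['L']]): A returns False, B raises IndexError
import Mathlib
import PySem

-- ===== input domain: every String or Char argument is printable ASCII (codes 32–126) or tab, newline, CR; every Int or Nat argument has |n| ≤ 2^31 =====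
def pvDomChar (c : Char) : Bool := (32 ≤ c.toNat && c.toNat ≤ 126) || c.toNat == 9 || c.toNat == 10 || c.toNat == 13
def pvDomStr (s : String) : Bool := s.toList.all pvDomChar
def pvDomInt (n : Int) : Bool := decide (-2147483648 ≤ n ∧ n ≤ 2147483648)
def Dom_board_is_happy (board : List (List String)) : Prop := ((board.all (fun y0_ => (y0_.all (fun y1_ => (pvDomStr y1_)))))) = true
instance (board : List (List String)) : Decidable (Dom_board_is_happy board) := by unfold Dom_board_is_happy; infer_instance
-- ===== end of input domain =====

-- B replaces A's per-lamp four-direction ray marching by one segment scan per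
-- row/column with a lamp counter reset at black cells (alternative algorithm).

-- ===== PORT A =====
-- is_numbered(cell)
def pvIsNumbered (c : String) : Bool := PySem.Str.strIsdigit c
-- is_black(cell)
def pvIsBlack (c : String) : Bool := (c == "X") || pvIsNumbered c
-- is_lamp(cell)
def pvIsLamp (c : String) : Bool := c == "L"
-- is_on_board(board, x, y)
def pvIsOnBoard (board : List (List String)) (x y : Int) : Bool :=
  decide (0 ≤ x ∧ x < (board.length : Int)) && decide (0 ≤ y ∧ y < (board.length : Int))
-- board[y][x]; total getter ("" when out of range — never reached under Pre_)
def pvCellA (board : List (List String)) (x y : Int) : String :=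
  (PySem.List.pyGet? ((PySem.List.pyGet? board y).getD []) x).getD ""
-- count_adjacent_lamps(board, start_x, start_y)
def pvCountAdj (board : List (List String)) (sx sy : Int) : Int :=
  [((-1 : Int), (0 : Int)), (1, 0), (0, -1), (0, 1)].foldl
    (fun lamps d =>
      let x := sx + d.1
      let y := sy + d.2
      if pvIsOnBoard board x y && pvIsLamp (pvCellA board x y) then lamps + 1 else lamps) 0
-- the 'while True' march of is_illuminated; fuel = len(board) steps always suffice
-- (the moving coordinate starts inside [0, len(board)) and changes by 1 each step)
def pvMarch (board : List (List String)) (dx dy : Int) : Int → Int → Nat → Bool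
  | _, _, 0 => false
  | x, y, fuel + 1 =>
    let x' := x + dx
    let y' := y + dy
    if !pvIsOnBoard board x' y' then false
    else
      let c := pvCellA board x' y'
      if pvIsBlack c then false
      else if pvIsLamp c then true
      else pvMarch board dx dy x' y' fuel
-- is_illuminated(board, start_x, start_y)
def pvIsIlluminated (board : List (List String)) (sx sy : Int) : Bool :=
  [((-1 : Int), (0 : Int)), (1, 0), (0, -1), (0, 1)].any
    (fun d => pvMarch board d.1 d.2 sx sy board.length)
-- board_is_happy(board): the double loop with its two early-return tests
def board_is_happy (board : List (List String)) : Bool :=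
  let size : Int := board.length
  !((PySem.List.pyRange 0 size 1).any (fun y =>
      (PySem.List.pyRange 0 size 1).any (fun x =>
        let c := pvCellA board x y
        (pvIsNumbered c && decide ((PySem.Int.ofStr? c).getD 0 < pvCountAdj board x y))
          || (pvIsLamp c && pvIsIlluminated board x y))))

-- ===== PORT B =====
-- grid[y][x]; total getter, as in A's side but for B's truncated grid
def altCell (grid : List (List String)) (x y : Int) : String :=
  (PySem.List.pyGet? ((PySem.List.pyGet? grid y).getD []) x).getD ""
-- the inner 'for nx, ny in …: if …: adj += 1' loop
def altAdj (grid : List (List String)) (n x y : Int) : Int :=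
  [(x - 1, y), (x + 1, y), (x, y - 1), (x, y + 1)].foldl
    (fun adj p =>
      if (decide (0 ≤ p.1 ∧ p.1 < n) && decide (0 ≤ p.2 ∧ p.2 < n))
          && (altCell grid p.1 p.2 == "L") then adj + 1 else adj) 0
-- the per-line scan: lamp counter, reset at black cells, ≥ 2 → unhappy
def altHasPair : List String → Int → Bool
  | [], _ => false
  | c :: rest, lamps =>
    if c == "X" || PySem.Str.strIsdigit c then altHasPair rest 0
    else if c == "L" then
      if 2 ≤ lamps + 1 then true else altHasPair rest (lamps + 1)
    else altHasPair rest lamps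
def board_is_happy_alt (board : List (List String)) : Bool :=
  let n : Int := board.length
  let grid := board.map (fun row => PySem.List.slice row none (some n))
  let numBad :=
    (PySem.List.pyRange 0 n 1).any (fun y =>
      (PySem.List.pyRange 0 n 1).any (fun x =>
        let c := altCell grid x y
        PySem.Str.strIsdigit c && decide ((PySem.Int.ofStr? c).getD 0 < altAdj grid n x y)))
  let lines :=
    grid ++ (PySem.List.pyRange 0 n 1).map (fun x =>
      (PySem.List.pyRange 0 n 1).map (fun y => altCell grid x y))
  !(numBad || lines.any (fun line => altHasPair line 0))

-- ===== PRECONDITION & SPEC =====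
-- Pre_ excludes ragged boards (a row shorter than the board), on which A's
-- board[y][x] raises IndexError unless an earlier cell already failed a test.
def Pre_board_is_happy (board : List (List String)) : Prop :=
  ∀ row ∈ board, board.length ≤ row.length
instance (board : List (List String)) : Decidable (Pre_board_is_happy board) := by
  unfold Pre_board_is_happy; infer_instance
def pvWitness_board_is_happy : List (List String) := [["L", "X"], ["1", "L"]]
def Spec_board_is_happy (board : List (List String)) (out : Bool) : Prop := out = board_is_happy_alt board
instance (board : List (List String)) (out : Bool) : Decidable (Spec_board_is_happy board out) := by unfold Spec_board_is_happy; infer_instance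

-- ===== CLAIM (what is proved, stated in full; the proofs are below) =====
def Claim_equal_board_is_happy : Prop := ∀ (board : List (List String)), Dom_board_is_happy board → Pre_board_is_happy board → Spec_board_is_happy board (board_is_happy board)

-- ===== LEMMAS AND PROOFS =====

-- cell access with Nat coordinates (proof layer)
def cellN (board : List (List String)) (x y : Nat) : String :=
  pvCellA board (x : Int) (y : Int)

-- a pair of lamps in one line with no black cell strictly between them
def PairIn (l : List String) : Prop :=
  ∃ i j : Nat, i < j ∧ j < l.length ∧ l.getD i "" = "L" ∧ l.getD j "" = "L" ∧
    ∀ m : Nat, i < m → m < j → pvIsBlack (l.getD m "") = false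

-- a lamp before the first black cell of the line
def HeadLamp (l : List String) : Prop :=
  ∃ j : Nat, j < l.length ∧ l.getD j "" = "L" ∧
    ∀ m : Nat, m < j → pvIsBlack (l.getD m "") = false

theorem black_ne_lamp {c : String} (h : pvIsBlack c = true) : c ≠ "L" := by
  intro rfl_h; subst rfl_h; simp [pvIsBlack, pvIsNumbered] at h
  exact absurd h (by decide)

theorem pairIn_cons (c : String) (l : List String) :
    PairIn (c :: l) ↔ PairIn l ∨ (c = "L" ∧ HeadLamp l) := by
  constructor
  · rintro ⟨i, j, hij, hjlen, hi, hj, hbet⟩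
    rcases j with _ | j
    · omega
    rcases i with _ | i
    · right
      refine ⟨by simpa using hi, j, by simpa using hjlen, by simpa using hj, ?_⟩
      intro m hm
      simpa using hbet (m + 1) (by omega) (by omega)
    · left
      refine ⟨i, j, by omega, by simpa using hjlen, by simpa using hi, by simpa using hj, ?_⟩
      intro m him hmj
      simpa using hbet (m + 1) (by omega) (by omega)
  · rintro (⟨i, j, hij, hjlen, hi, hj, hbet⟩ | ⟨hc, j, hjlen, hj, hbet⟩)
    · refine ⟨i + 1, j + 1, by omega, by simpa using hjlen, by simpa using hi,
        by simpa using hj, ?_⟩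
      intro m h1 h2
      rcases m with _ | m
      · omega
      · simpa using hbet m (by omega) (by omega)
    · refine ⟨0, j + 1, by omega, by simpa using hjlen, by simpa using hc,
        by simpa using hj, ?_⟩
      intro m h1 h2
      rcases m with _ | m
      · omega
      · simpa using hbet m (by omega)

theorem headLamp_cons (c : String) (l : List String) :
    HeadLamp (c :: l) ↔ c = "L" ∨ (pvIsBlack c = false ∧ HeadLamp l) := by
  constructor
  · rintro ⟨j, hjlen, hj, hbet⟩
    rcases j with _ | j
    · left; simpa using hj
    · right
      refine ⟨by simpa using hbet 0 (by omega), j, by simpa using hjlen, by simpa using hj, ?_⟩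
      intro m hm
      simpa using hbet (m + 1) (by omega)
  · rintro (hc | ⟨hcb, j, hjlen, hj, hbet⟩)
    · exact ⟨0, by simp, by simpa using hc, fun m hm => by omega⟩
    · refine ⟨j + 1, by simpa using hjlen, by simpa using hj, ?_⟩
      intro m hm
      rcases m with _ | m
      · simpa using hcb
      · simpa using hbet m (by omega)

theorem altHasPair_iff (l : List String) (k : Int) (hk : 0 ≤ k) :
    altHasPair l k = true ↔ PairIn l ∨ (1 ≤ k ∧ HeadLamp l) := by
  induction l generalizing k with
  | nil =>
    constructor
    · intro h; simp [altHasPair] at h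
    · rintro (⟨i, j, hij, hjlen, -⟩ | ⟨-, j, hjlen, -⟩) <;> simp at hjlen
  | cons c rest ih =>
    rw [pairIn_cons, headLamp_cons, altHasPair]
    by_cases hb : (c == "X" || PySem.Str.strIsdigit c) = true
    · have hblack : pvIsBlack c = true := by simpa [pvIsBlack, pvIsNumbered] using hb
      have hcl : c ≠ "L" := black_ne_lamp hblack
      rw [if_pos hb, ih 0 le_rfl]
      simp [hblack, hcl]
    · have hbf : pvIsBlack c = false := by
        simpa [pvIsBlack, pvIsNumbered] using hb
      rw [if_neg hb]
      by_cases hL : (c == "L") = true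
      · have hcl : c = "L" := by simpa using hL
        rw [if_pos hL]
        by_cases h2 : (2 : Int) ≤ k + 1
        · rw [if_pos h2]
          have hk1 : (1 : Int) ≤ k := by omega
          simp [hcl, hk1]
        · have hk0 : k = 0 := by omega
          rw [if_neg h2, ih (k + 1) (by omega)]
          subst hk0
          simp [hcl]
      · have hcl : c ≠ "L" := by simpa using hL
        rw [if_neg hL, ih k hk]
        simp [hcl, hbf]

theorem march_right (board : List (List String)) (y : Nat) (hy : y < board.length)
    (x fuel : Nat) (hfuel : board.length ≤ x + fuel) :
    pvMarch board 1 0 (x : Int) (y : Int) fuel = true ↔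
      ∃ j : Nat, x < j ∧ j < board.length ∧ cellN board j y = "L" ∧
        ∀ m : Nat, x < m → m < j → pvIsBlack (cellN board m y) = false := by
  simp only [cellN]
  induction fuel generalizing x with
  | zero =>
    constructor
    · intro h; simp [pvMarch] at h
    · rintro ⟨j, h1, h2, -⟩; omega
  | succ fuel ih =>
    rw [pvMarch]
    rw [show ((x : Int) + 1) = ((x + 1 : Nat) : Int) by push_cast; ring,
        show ((y : Int) + 0) = (y : Int) by ring]
    by_cases hxn : x + 1 < board.length
    · have hob : pvIsOnBoard board ((x + 1 : Nat) : Int) (y : Int) = true := by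
        simp only [pvIsOnBoard, Bool.and_eq_true, decide_eq_true_eq]
        constructor <;> constructor <;> omega
      rw [hob, if_neg (by simp : ¬((!true) = true))]
      by_cases hbl : pvIsBlack (pvCellA board ((x + 1 : Nat) : Int) (y : Int)) = true
      · rw [if_pos hbl]
        constructor
        · intro h; cases h
        · rintro ⟨j, h1, h2, h3, h4⟩
          rcases Nat.lt_or_ge (x + 1) j with hj | hj
          · rw [h4 (x + 1) (by omega) hj] at hbl; cases hbl
          · have : j = x + 1 := by omega
            subst this
            rw [h3] at hbl
            exact absurd hbl (by decide)
      · rw [if_neg hbl]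
        have hbf : pvIsBlack (pvCellA board ((x + 1 : Nat) : Int) (y : Int)) = false := by
          simpa using hbl
        by_cases hlm : pvIsLamp (pvCellA board ((x + 1 : Nat) : Int) (y : Int)) = true
        · rw [if_pos hlm]
          constructor
          · intro _
            exact ⟨x + 1, by omega, hxn, by simpa [pvIsLamp] using hlm,
              fun m h1 h2 => by omega⟩
          · intro _; rfl
        · rw [if_neg hlm, ih (x + 1) (by omega)]
          constructor
          · rintro ⟨j, h1, h2, h3, h4⟩
            refine ⟨j, by omega, h2, h3, fun m hm1 hm2 => ?_⟩
            rcases Nat.lt_or_ge (x + 1) m with hm | hm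
            · exact h4 m hm hm2
            · have : m = x + 1 := by omega
              subst this; exact hbf
          · rintro ⟨j, h1, h2, h3, h4⟩
            have hne : j ≠ x + 1 := by
              intro hj; subst hj
              rw [h3] at hlm
              exact absurd (by simp [pvIsLamp]) hlm
            exact ⟨j, by omega, h2, h3, fun m a b => h4 m (by omega) b⟩
    · have hob : pvIsOnBoard board ((x + 1 : Nat) : Int) (y : Int) = false := by
        simp only [pvIsOnBoard, Bool.and_eq_false_iff]
        left
        simp only [decide_eq_false_iff_not]
        omega
      rw [hob, if_pos (by simp : ((!false) = true))]
      constructor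
      · intro h; cases h
      · rintro ⟨j, h1, h2, -⟩; omega

theorem march_left (board : List (List String)) (y : Nat) (hy : y < board.length)
    (x fuel : Nat) (hx : x ≤ board.length) (hfuel : x < fuel) :
    pvMarch board (-1) 0 (x : Int) (y : Int) fuel = true ↔
      ∃ j : Nat, j < x ∧ cellN board j y = "L" ∧
        ∀ m : Nat, j < m → m < x → pvIsBlack (cellN board m y) = false := by
  simp only [cellN]
  induction fuel generalizing x with
  | zero => exact absurd hfuel (by omega)
  | succ fuel ih =>
    rw [pvMarch]
    by_cases hx0 : x = 0
    · have hob : pvIsOnBoard board ((x : Int) + -1) ((y : Nat) : Int) = false := by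
        simp only [pvIsOnBoard, Bool.and_eq_false_iff]
        left
        simp only [decide_eq_false_iff_not]
        omega
      rw [show ((y : Int) + 0) = (y : Int) by ring]
      rw [hob, if_pos (by simp : ((!false) = true))]
      constructor
      · intro h; cases h
      · rintro ⟨j, h1, -⟩; omega
    · obtain ⟨xs, rfl⟩ : ∃ xs, x = xs + 1 := ⟨x - 1, by omega⟩
      rw [show (((xs + 1 : Nat) : Int) + -1) = ((xs : Nat) : Int) by push_cast; ring,
          show ((y : Int) + 0) = (y : Int) by ring]
      have hob : pvIsOnBoard board ((xs : Nat) : Int) ((y : Nat) : Int) = true := by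
        simp only [pvIsOnBoard, Bool.and_eq_true, decide_eq_true_eq]
        constructor <;> constructor <;> omega
      rw [hob, if_neg (by simp : ¬((!true) = true))]
      by_cases hbl : pvIsBlack (pvCellA board ((xs : Nat) : Int) (y : Int)) = true
      · rw [if_pos hbl]
        constructor
        · intro h; cases h
        · rintro ⟨j, h1, h3, h4⟩
          rcases Nat.lt_or_ge j xs with hj | hj
          · rw [h4 xs (by omega) (by omega)] at hbl; cases hbl
          · have : j = xs := by omega
            subst this
            rw [h3] at hbl
            exact absurd hbl (by decide)
      · rw [if_neg hbl]
        have hbf : pvIsBlack (pvCellA board ((xs : Nat) : Int) (y : Int)) = false := by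
          simpa using hbl
        by_cases hlm : pvIsLamp (pvCellA board ((xs : Nat) : Int) (y : Int)) = true
        · rw [if_pos hlm]
          constructor
          · intro _
            exact ⟨xs, by omega, by simpa [pvIsLamp] using hlm, fun m h1 h2 => by omega⟩
          · intro _; rfl
        · rw [if_neg hlm, ih xs (by omega) (by omega)]
          constructor
          · rintro ⟨j, h1, h3, h4⟩
            refine ⟨j, by omega, h3, fun m hm1 hm2 => ?_⟩
            rcases Nat.lt_or_ge m xs with hm | hm
            · exact h4 m hm1 hm
            · have : m = xs := by omega
              subst this; exact hbf
          · rintro ⟨j, h1, h3, h4⟩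
            have hne : j ≠ xs := by
              intro hj; subst hj
              rw [h3] at hlm
              exact absurd (by simp [pvIsLamp]) hlm
            exact ⟨j, by omega, h3, fun m a b => h4 m a (by omega)⟩

theorem march_down (board : List (List String)) (x : Nat) (hx : x < board.length)
    (y fuel : Nat) (hfuel : board.length ≤ y + fuel) :
    pvMarch board 0 1 (x : Int) (y : Int) fuel = true ↔
      ∃ j : Nat, y < j ∧ j < board.length ∧ cellN board x j = "L" ∧
        ∀ m : Nat, y < m → m < j → pvIsBlack (cellN board x m) = false := by
  simp only [cellN]
  induction fuel generalizing y with
  | zero =>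
    constructor
    · intro h; simp [pvMarch] at h
    · rintro ⟨j, h1, h2, -⟩; omega
  | succ fuel ih =>
    rw [pvMarch]
    rw [show ((y : Int) + 1) = ((y + 1 : Nat) : Int) by push_cast; ring,
        show ((x : Int) + 0) = (x : Int) by ring]
    by_cases hyn : y + 1 < board.length
    · have hob : pvIsOnBoard board ((x : Nat) : Int) ((y + 1 : Nat) : Int) = true := by
        simp only [pvIsOnBoard, Bool.and_eq_true, decide_eq_true_eq]
        constructor <;> constructor <;> omega
      rw [hob, if_neg (by simp : ¬((!true) = true))]
      by_cases hbl : pvIsBlack (pvCellA board (x : Int) ((y + 1 : Nat) : Int)) = true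
      · rw [if_pos hbl]
        constructor
        · intro h; cases h
        · rintro ⟨j, h1, h2, h3, h4⟩
          rcases Nat.lt_or_ge (y + 1) j with hj | hj
          · rw [h4 (y + 1) (by omega) hj] at hbl; cases hbl
          · have : j = y + 1 := by omega
            subst this
            rw [h3] at hbl
            exact absurd hbl (by decide)
      · rw [if_neg hbl]
        have hbf : pvIsBlack (pvCellA board (x : Int) ((y + 1 : Nat) : Int)) = false := by
          simpa using hbl
        by_cases hlm : pvIsLamp (pvCellA board (x : Int) ((y + 1 : Nat) : Int)) = true
        · rw [if_pos hlm]
          constructor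
          · intro _
            exact ⟨y + 1, by omega, hyn, by simpa [pvIsLamp] using hlm,
              fun m h1 h2 => by omega⟩
          · intro _; rfl
        · rw [if_neg hlm, ih (y + 1) (by omega)]
          constructor
          · rintro ⟨j, h1, h2, h3, h4⟩
            refine ⟨j, by omega, h2, h3, fun m hm1 hm2 => ?_⟩
            rcases Nat.lt_or_ge (y + 1) m with hm | hm
            · exact h4 m hm hm2
            · have : m = y + 1 := by omega
              subst this; exact hbf
          · rintro ⟨j, h1, h2, h3, h4⟩
            have hne : j ≠ y + 1 := by
              intro hj; subst hj
              rw [h3] at hlm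
              exact absurd (by simp [pvIsLamp]) hlm
            exact ⟨j, by omega, h2, h3, fun m a b => h4 m (by omega) b⟩
    · have hob : pvIsOnBoard board ((x : Nat) : Int) ((y + 1 : Nat) : Int) = false := by
        simp only [pvIsOnBoard, Bool.and_eq_false_iff]
        right
        simp only [decide_eq_false_iff_not]
        omega
      rw [hob, if_pos (by simp : ((!false) = true))]
      constructor
      · intro h; cases h
      · rintro ⟨j, h1, h2, -⟩; omega

theorem march_up (board : List (List String)) (x : Nat) (hx : x < board.length)
    (y fuel : Nat) (hy : y ≤ board.length) (hfuel : y < fuel) :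
    pvMarch board 0 (-1) (x : Int) (y : Int) fuel = true ↔
      ∃ j : Nat, j < y ∧ cellN board x j = "L" ∧
        ∀ m : Nat, j < m → m < y → pvIsBlack (cellN board x m) = false := by
  simp only [cellN]
  induction fuel generalizing y with
  | zero => exact absurd hfuel (by omega)
  | succ fuel ih =>
    rw [pvMarch]
    by_cases hy0 : y = 0
    · have hob : pvIsOnBoard board ((x : Nat) : Int) ((y : Int) + -1) = false := by
        simp only [pvIsOnBoard, Bool.and_eq_false_iff]
        right
        simp only [decide_eq_false_iff_not]
        omega
      rw [show ((x : Int) + 0) = (x : Int) by ring]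
      rw [hob, if_pos (by simp : ((!false) = true))]
      constructor
      · intro h; cases h
      · rintro ⟨j, h1, -⟩; omega
    · obtain ⟨ys, rfl⟩ : ∃ ys, y = ys + 1 := ⟨y - 1, by omega⟩
      rw [show (((ys + 1 : Nat) : Int) + -1) = ((ys : Nat) : Int) by push_cast; ring,
          show ((x : Int) + 0) = (x : Int) by ring]
      have hob : pvIsOnBoard board ((x : Nat) : Int) ((ys : Nat) : Int) = true := by
        simp only [pvIsOnBoard, Bool.and_eq_true, decide_eq_true_eq]
        constructor <;> constructor <;> omega
      rw [hob, if_neg (by simp : ¬((!true) = true))]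
      by_cases hbl : pvIsBlack (pvCellA board (x : Int) ((ys : Nat) : Int)) = true
      · rw [if_pos hbl]
        constructor
        · intro h; cases h
        · rintro ⟨j, h1, h3, h4⟩
          rcases Nat.lt_or_ge j ys with hj | hj
          · rw [h4 ys (by omega) (by omega)] at hbl; cases hbl
          · have : j = ys := by omega
            subst this
            rw [h3] at hbl
            exact absurd hbl (by decide)
      · rw [if_neg hbl]
        have hbf : pvIsBlack (pvCellA board (x : Int) ((ys : Nat) : Int)) = false := by
          simpa using hbl
        by_cases hlm : pvIsLamp (pvCellA board (x : Int) ((ys : Nat) : Int)) = true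
        · rw [if_pos hlm]
          constructor
          · intro _
            exact ⟨ys, by omega, by simpa [pvIsLamp] using hlm, fun m h1 h2 => by omega⟩
          · intro _; rfl
        · rw [if_neg hlm, ih ys (by omega) (by omega)]
          constructor
          · rintro ⟨j, h1, h3, h4⟩
            refine ⟨j, by omega, h3, fun m hm1 hm2 => ?_⟩
            rcases Nat.lt_or_ge m ys with hm | hm
            · exact h4 m hm1 hm
            · have : m = ys := by omega
              subst this; exact hbf
          · rintro ⟨j, h1, h3, h4⟩
            have hne : j ≠ ys := by
              intro hj; subst hj
              rw [h3] at hlm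
              exact absurd (by simp [pvIsLamp]) hlm
            exact ⟨j, by omega, h3, fun m a b => h4 m a (by omega)⟩

theorem any_pyRange (n : Nat) (p : Int → Bool) :
    (PySem.List.pyRange 0 (n : Int) 1).any p = true ↔ ∃ k : Nat, k < n ∧ p (k : Int) = true := by
  rw [PySem.List.pyRange_zero_natCast]
  simp [List.any_eq_true]

theorem cellN_eq_getElem (board : List (List String)) (x y : Nat) (hy : y < board.length)
    (hx : x < board[y].length) : cellN board x y = board[y][x] := by
  simp [cellN, pvCellA, hy, hx]

theorem altCell_eq (board : List (List String)) (hPre : Pre_board_is_happy board)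
    (x y : Nat) (hx : x < board.length) (hy : y < board.length) :
    altCell (board.map (fun row => PySem.List.slice row none (some (board.length : Int)))) (x : Int) (y : Int)
      = cellN board x y := by
  have hrow : board.length ≤ board[y].length := hPre _ (List.getElem_mem hy)
  simp only [altCell, PySem.List.slice_to_natCast]
  rw [cellN_eq_getElem board x y hy (by omega)]
  simp [hy, hx, List.getElem_take, hrow]

theorem getD_map_range'' (f : Nat → String) (n k : Nat) (h : k < n) :
    ((List.range n).map f).getD k "" = f k := by
  simp [List.getD, h]

theorem pairIn_map_range (f : Nat → String) (n : Nat) :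
    PairIn ((List.range n).map f) ↔
      ∃ i j : Nat, i < j ∧ j < n ∧ f i = "L" ∧ f j = "L" ∧
        ∀ m, i < m → m < j → pvIsBlack (f m) = false := by
  unfold PairIn
  simp only [List.length_map, List.length_range]
  constructor
  · rintro ⟨i, j, hij, hj, hi, hjL, hbet⟩
    rw [getD_map_range'' f n i (by omega)] at hi
    rw [getD_map_range'' f n j hj] at hjL
    exact ⟨i, j, hij, hj, hi, hjL, fun m h1 h2 => by
      have := hbet m h1 h2
      rwa [getD_map_range'' f n m (by omega)] at this⟩
  · rintro ⟨i, j, hij, hj, hi, hjL, hbet⟩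
    refine ⟨i, j, hij, hj, ?_, ?_, fun m h1 h2 => ?_⟩
    · rwa [getD_map_range'' f n i (by omega)]
    · rwa [getD_map_range'' f n j hj]
    · rw [getD_map_range'' f n m (by omega)]
      exact hbet m h1 h2

theorem take_row_eq (board : List (List String)) (hPre : Pre_board_is_happy board)
    (y : Nat) (hy : y < board.length) :
    board[y].take board.length = (List.range board.length).map (fun x => cellN board x y) := by
  have hrow : board.length ≤ board[y].length := hPre _ (List.getElem_mem hy)
  apply List.ext_getElem
  · simp [List.length_take]; omega
  · intro k h1 h2
    simp only [List.getElem_take, List.getElem_map, List.getElem_range]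
    rw [cellN_eq_getElem board k y hy (by simp [List.length_take] at h1; omega)]

-- common middle form: some numbered cell over budget, or a lamp pair in a row or column
def Mid (board : List (List String)) : Prop :=
  (∃ y, y < board.length ∧ ∃ x, x < board.length ∧
      PySem.Str.strIsdigit (cellN board x y) = true ∧
      (PySem.Int.ofStr? (cellN board x y)).getD 0 < pvCountAdj board (x : Int) (y : Int))
  ∨ (∃ y, y < board.length ∧
      PairIn ((List.range board.length).map (fun x => cellN board x y)))
  ∨ (∃ x, x < board.length ∧
      PairIn ((List.range board.length).map (fun y => cellN board x y)))

theorem illum_part (board : List (List String)) :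
    (∃ y, y < board.length ∧ ∃ x, x < board.length ∧ cellN board x y = "L" ∧
        pvIsIlluminated board (x : Int) (y : Int) = true)
    ↔ (∃ y, y < board.length ∧
        PairIn ((List.range board.length).map (fun x => cellN board x y)))
      ∨ (∃ x, x < board.length ∧
        PairIn ((List.range board.length).map (fun y => cellN board x y))) := by
  simp only [pairIn_map_range]
  constructor
  · rintro ⟨y, hy, x, hx, hlamp, hill⟩
    simp only [pvIsIlluminated, List.any_cons, List.any_nil, Bool.or_eq_true,
      Bool.or_false] at hill
    rcases hill with h | h | h | h
    · obtain ⟨j, hj, hjL, hbet⟩ :=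
        (march_left board y hy x board.length (by omega) hx).mp h
      exact Or.inl ⟨y, hy, j, x, hj, hx, hjL, hlamp, hbet⟩
    · obtain ⟨j, h1, h2, h3, h4⟩ :=
        (march_right board y hy x board.length (by omega)).mp h
      exact Or.inl ⟨y, hy, x, j, h1, h2, hlamp, h3, h4⟩
    · obtain ⟨j, hj, hjL, hbet⟩ :=
        (march_up board x hx y board.length (by omega) hy).mp h
      exact Or.inr ⟨x, hx, j, y, hj, hy, hjL, hlamp, hbet⟩
    · obtain ⟨j, h1, h2, h3, h4⟩ :=
        (march_down board x hx y board.length (by omega)).mp h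
      exact Or.inr ⟨x, hx, y, j, h1, h2, hlamp, h3, h4⟩
  · rintro (⟨y, hy, i, j, hij, hj, hi, hjL, hbet⟩ | ⟨x, hx, i, j, hij, hj, hi, hjL, hbet⟩)
    · refine ⟨y, hy, i, by omega, hi, ?_⟩
      simp only [pvIsIlluminated, List.any_cons, List.any_nil, Bool.or_eq_true,
        Bool.or_false]
      exact Or.inr (Or.inl
        ((march_right board y hy i board.length (by omega)).mpr ⟨j, hij, hj, hjL, hbet⟩))
    · refine ⟨i, by omega, x, hx, hi, ?_⟩
      simp only [pvIsIlluminated, List.any_cons, List.any_nil, Bool.or_eq_true,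
        Bool.or_false]
      exact Or.inr (Or.inr (Or.inr
        ((march_down board x hx i board.length (by omega)).mpr ⟨j, hij, hj, hjL, hbet⟩)))

theorem cond_eq (board : List (List String)) (hPre : Pre_board_is_happy board)
    (nx ny : Int) :
    (pvIsOnBoard board nx ny && pvIsLamp (pvCellA board nx ny))
      = ((decide (0 ≤ nx ∧ nx < (board.length : Int)) && decide (0 ≤ ny ∧ ny < (board.length : Int)))
          && (altCell (board.map (fun row => PySem.List.slice row none (some (board.length : Int)))) nx ny == "L")) := by
  have hob : pvIsOnBoard board nx ny
      = (decide (0 ≤ nx ∧ nx < (board.length : Int)) && decide (0 ≤ ny ∧ ny < (board.length : Int))) := rfl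
  rw [← hob]
  by_cases h : pvIsOnBoard board nx ny = true
  · rw [h, Bool.true_and, Bool.true_and]
    have hb := h
    simp only [pvIsOnBoard, Bool.and_eq_true, decide_eq_true_eq] at hb
    obtain ⟨⟨h1, h2⟩, h3, h4⟩ := hb
    have ex : nx = ((nx.toNat : Nat) : Int) := by omega
    have ey : ny = ((ny.toNat : Nat) : Int) := by omega
    rw [ex, ey, altCell_eq board hPre nx.toNat ny.toNat (by omega) (by omega)]
    rfl
  · rw [Bool.eq_false_iff.mpr h, Bool.false_and, Bool.false_and]

theorem adj_eq (board : List (List String)) (hPre : Pre_board_is_happy board) (x y : Int) :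
    altAdj (board.map (fun row => PySem.List.slice row none (some (board.length : Int))))
        (board.length : Int) x y = pvCountAdj board x y := by
  simp only [altAdj, pvCountAdj, List.foldl_cons, List.foldl_nil]
  simp only [cond_eq board hPre]
  norm_num
  simp only [Int.sub_eq_add_neg]
  split_ifs <;> rfl

theorem A_false_iff (board : List (List String)) (_hPre : Pre_board_is_happy board) :
    board_is_happy board = false ↔ Mid board := by
  simp only [board_is_happy]
  rw [Bool.not_eq_false']
  simp only [any_pyRange, Bool.or_eq_true, Bool.and_eq_true, decide_eq_true_eq]
  have hcell : ∀ a b : Nat, pvCellA board (a : Int) (b : Int) = cellN board a b :=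
    fun _ _ => rfl
  simp only [hcell, pvIsNumbered, pvIsLamp, beq_iff_eq]
  constructor
  · rintro ⟨y, hy, x, hx, ⟨hnum, hcnt⟩ | ⟨hlamp, hill⟩⟩
    · exact Or.inl ⟨y, hy, x, hx, hnum, hcnt⟩
    · exact Or.inr ((illum_part board).mp ⟨y, hy, x, hx, hlamp, hill⟩)
  · rintro (⟨y, hy, x, hx, hnum, hcnt⟩ | hpair)
    · exact ⟨y, hy, x, hx, Or.inl ⟨hnum, hcnt⟩⟩
    · obtain ⟨y, hy, x, hx, hlamp, hill⟩ := (illum_part board).mpr hpair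
      exact ⟨y, hy, x, hx, Or.inr ⟨hlamp, hill⟩⟩

theorem B_false_iff (board : List (List String)) (hPre : Pre_board_is_happy board) :
    board_is_happy_alt board = false ↔ Mid board := by
  simp only [board_is_happy_alt]
  rw [Bool.not_eq_false', Bool.or_eq_true, List.any_append, Bool.or_eq_true]
  constructor
  · rintro (hnum | hrows | hcols)
    · rw [any_pyRange] at hnum
      obtain ⟨ky, hky, h2⟩ := hnum
      rw [any_pyRange] at h2
      obtain ⟨kx, hkx, h3⟩ := h2
      simp only [Bool.and_eq_true, decide_eq_true_eq] at h3
      rw [altCell_eq board hPre kx ky hkx hky, adj_eq board hPre] at h3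
      exact Or.inl ⟨ky, hky, kx, hkx, h3.1, h3.2⟩
    · rw [List.any_eq_true] at hrows
      obtain ⟨line, hmem, hhp⟩ := hrows
      obtain ⟨row, hrow, rfl⟩ := List.mem_map.mp hmem
      obtain ⟨y, hy, rfl⟩ := List.mem_iff_getElem.mp hrow
      rw [PySem.List.slice_to_natCast, take_row_eq board hPre y hy,
        altHasPair_iff _ 0 le_rfl] at hhp
      rcases hhp with hpair | ⟨hk, -⟩
      · exact Or.inr (Or.inl ⟨y, hy, hpair⟩)
      · exact absurd hk (by omega)
    · rw [List.any_eq_true] at hcols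
      obtain ⟨line, hmem, hhp⟩ := hcols
      obtain ⟨xi, hxi, rfl⟩ := List.mem_map.mp hmem
      rw [PySem.List.mem_pyRange_one] at hxi
      have hxeq : xi = ((xi.toNat : Nat) : Int) := by omega
      have hcol : (PySem.List.pyRange 0 (board.length : Int) 1).map
            (fun y => altCell (board.map (fun row => PySem.List.slice row none (some (board.length : Int)))) xi y)
          = (List.range board.length).map (fun ky => cellN board xi.toNat ky) := by
        rw [PySem.List.pyRange_zero_natCast, List.map_map]
        refine List.map_congr_left (fun ky hky => ?_)
        rw [List.mem_range] at hky
        rw [Function.comp_apply, hxeq, altCell_eq board hPre xi.toNat ky (by omega) hky]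
        rw [Int.toNat_natCast]
      rw [hcol, altHasPair_iff _ 0 le_rfl] at hhp
      rcases hhp with hpair | ⟨hk, -⟩
      · exact Or.inr (Or.inr ⟨xi.toNat, by omega, hpair⟩)
      · exact absurd hk (by omega)
  · rintro (⟨y, hy, x, hx, hnum, hcnt⟩ | ⟨y, hy, hpair⟩ | ⟨x, hx, hpair⟩)
    · refine Or.inl ?_
      rw [any_pyRange]
      refine ⟨y, hy, ?_⟩
      rw [any_pyRange]
      refine ⟨x, hx, ?_⟩
      simp only [Bool.and_eq_true, decide_eq_true_eq]
      rw [altCell_eq board hPre x y hx hy, adj_eq board hPre]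
      exact ⟨hnum, hcnt⟩
    · refine Or.inr (Or.inl ?_)
      rw [List.any_eq_true]
      refine ⟨PySem.List.slice board[y] none (some (board.length : Int)),
        List.mem_map.mpr ⟨board[y], List.getElem_mem hy, rfl⟩, ?_⟩
      rw [PySem.List.slice_to_natCast, take_row_eq board hPre y hy,
        altHasPair_iff _ 0 le_rfl]
      exact Or.inl hpair
    · refine Or.inr (Or.inr ?_)
      rw [List.any_eq_true]
      have hmem : ((x : Nat) : Int) ∈ PySem.List.pyRange 0 (board.length : Int) 1 := by
        rw [PySem.List.mem_pyRange_one]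
        constructor <;> [omega; exact_mod_cast hx]
      refine ⟨_, List.mem_map.mpr ⟨((x : Nat) : Int), hmem, rfl⟩, ?_⟩
      have hcol : (PySem.List.pyRange 0 (board.length : Int) 1).map
            (fun y => altCell (board.map (fun row => PySem.List.slice row none (some (board.length : Int)))) ((x : Nat) : Int) y)
          = (List.range board.length).map (fun ky => cellN board x ky) := by
        rw [PySem.List.pyRange_zero_natCast, List.map_map]
        refine List.map_congr_left (fun ky hky => ?_)
        rw [List.mem_range] at hky
        rw [Function.comp_apply, altCell_eq board hPre x ky hx hky]
      rw [hcol, altHasPair_iff _ 0 le_rfl]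
      exact Or.inl hpair

-- ===== VERDICT (by name: the statement is the Claim_ definition above) =====
theorem board_is_happy_spec : Claim_equal_board_is_happy := by
  intro board hDom hPre
  unfold Spec_board_is_happy
  have hA := A_false_iff board hPre
  have hB := B_false_iff board hPre
  by_cases hM : Mid board
  · rw [hA.mpr hM, hB.mpr hM]
  · have a1 : board_is_happy board = true :=
      Bool.ne_false_iff.mp (fun h => hM (hA.mp h))
    have b1 : board_is_happy_alt board = true :=
      Bool.ne_false_iff.mp (fun h => hM (hB.mp h))
    rw [a1, b1]
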